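-- pv_equiv track=rewrite | github.com/valen22br/pythonProjects | fau/H3/solution/p3.py | get_columns_no_lc
-- ===== SOURCE A (Python) =====
-- def get_columns_no_lc(data_lst, cols_lst):
--     """Same as get_columns(), but without list comprehensions.
--     Read and compare.
--     """
--     selected_cols_lst = []
--     for col_name in cols_lst:
--         try:
--             col_idx = data_lst[0].index(col_name)
--         except ValueError:     # bad name
--             continue
--         col_lst = []
--         for i in range(1,len(data_lst)):
--             col_lst.append(data_lst[i][col_idx])
--         selected_cols_lst.append(col_lst)
--     return selected_cols_lst
-- ===== SOURCE B (Python) =====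
-- def get_columns_no_lc(data_lst, cols_lst):
--     """Single transpose-style pass: resolve the requested column indices once,
--     then walk the rows once, appending each row's cells into per-column
--     accumulators."""
--     idxs = []
--     for name in cols_lst:
--         try:
--             idxs.append(data_lst[0].index(name))
--         except ValueError:
--             pass
--     cols = [[] for _ in idxs]
--     for row in data_lst[1:]:
--         for col, idx in zip(cols, idxs):
--             col.append(row[idx])
--     return cols
-- ===== Notes on version B (the rewrite author's own statement) =====
-- stated objective: alternative
-- what changed: Loop nesting is interchanged: B resolves all requested column names to header indices once, then makes a single row-outer pass appending row[idx] into per-column accumulators (transpose-style), instead of A's column-outer loop with an inner pass over the rows for each column.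
import Mathlib
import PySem

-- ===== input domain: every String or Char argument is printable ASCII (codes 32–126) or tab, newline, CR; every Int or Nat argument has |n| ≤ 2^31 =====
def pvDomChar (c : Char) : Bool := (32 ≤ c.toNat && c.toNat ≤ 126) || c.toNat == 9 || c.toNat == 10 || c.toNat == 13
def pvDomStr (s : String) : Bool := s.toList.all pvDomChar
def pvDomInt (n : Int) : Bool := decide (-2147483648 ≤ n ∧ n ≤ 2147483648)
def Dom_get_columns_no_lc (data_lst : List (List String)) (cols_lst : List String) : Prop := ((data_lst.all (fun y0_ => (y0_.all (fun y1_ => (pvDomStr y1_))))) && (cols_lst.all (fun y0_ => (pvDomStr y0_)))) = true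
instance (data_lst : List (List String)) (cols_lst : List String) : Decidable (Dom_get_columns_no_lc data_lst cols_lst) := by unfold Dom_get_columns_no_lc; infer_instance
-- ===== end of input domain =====

-- B interchanges the loop nesting: it resolves the requested header indices once, then makes a
-- single row-outer pass appending each cell into per-column accumulators (transpose-style),
-- instead of A's column-outer loop with an inner pass over the rows per column.

-- ===== PORT A =====
def get_columns_no_lc (data_lst : List (List String)) (cols_lst : List String) : List (List String) :=
  -- selected_cols_lst = []; for col_name in cols_lst: ...
  cols_lst.foldl (fun selected_cols_lst col_name =>
    -- try: col_idx = data_lst[0].index(col_name)  except ValueError: continue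
    match PySem.List.index? (PySem.List.pyGetD data_lst 0 []) col_name with
    | none => selected_cols_lst
    | some col_idx =>
      -- col_lst = []; for i in range(1, len(data_lst)): col_lst.append(data_lst[i][col_idx])
      let col_lst := (PySem.List.pyRange 1 data_lst.length 1).foldl
        (fun col_lst i =>
          col_lst ++ [PySem.List.pyGetD (PySem.List.pyGetD data_lst i []) (col_idx : Int) ""]) []
      selected_cols_lst ++ [col_lst]) []

-- ===== PORT B =====
def get_columns_no_lc_alt (data_lst : List (List String)) (cols_lst : List String) : List (List String) :=
  -- idxs = []; for name in cols_lst: try: idxs.append(data_lst[0].index(name)) except ValueError: pass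
  let idxs := cols_lst.foldl (fun idxs name =>
    match PySem.List.index? (PySem.List.pyGetD data_lst 0 []) name with
    | some j => idxs ++ [j]
    | none => idxs) []
  -- cols = [[] for _ in idxs]
  let cols := idxs.map (fun _ => ([] : List String))
  -- for row in data_lst[1:]: for col, idx in zip(cols, idxs): col.append(row[idx])
  -- (the zip loop appends row[idx] in place to each paired col: columnwise zipWith)
  (PySem.List.slice data_lst (some 1) none).foldl (fun cols row =>
    List.zipWith (fun (col : List String) (idx : Nat) =>
      col ++ [PySem.List.pyGetD row (idx : Int) ""]) cols idxs) cols

-- ===== PRECONDITION & SPEC =====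
-- Pre_ excludes exactly the inputs where the Python A (and B) raises IndexError: empty data_lst
-- with a nonempty cols_lst (the data_lst[0] read fails), or a resolved column's header index
-- exceeding some data row's length.
def Pre_get_columns_no_lc (data_lst : List (List String)) (cols_lst : List String) : Prop :=
  (data_lst = [] → cols_lst = []) ∧
  (cols_lst.all (fun name =>
    (PySem.List.index? (data_lst.headD []) name).all (fun j =>
      data_lst.tail.all (fun row => decide (j < row.length)))) = true)
instance (data_lst : List (List String)) (cols_lst : List String) : Decidable (Pre_get_columns_no_lc data_lst cols_lst) := by unfold Pre_get_columns_no_lc; infer_instance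
def pvWitness_get_columns_no_lc : List (List String) × List String :=
  ([["id", "name"], ["1", "alice"], ["2", "bob"]], ["name", "id", "zz"])
def Spec_get_columns_no_lc (data_lst : List (List String)) (cols_lst : List String) (out : List (List String)) : Prop := out = get_columns_no_lc_alt data_lst cols_lst
instance (data_lst : List (List String)) (cols_lst : List String) (out : List (List String)) : Decidable (Spec_get_columns_no_lc data_lst cols_lst out) := by unfold Spec_get_columns_no_lc; infer_instance

-- ===== CLAIM (what is proved, stated in full; the proofs are below) =====
def Claim_equal_get_columns_no_lc : Prop := ∀ (data_lst : List (List String)) (cols_lst : List String), Dom_get_columns_no_lc data_lst cols_lst → Pre_get_columns_no_lc data_lst cols_lst → Spec_get_columns_no_lc data_lst cols_lst (get_columns_no_lc data_lst cols_lst)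

-- ===== LEMMAS AND PROOFS =====

-- the resolved header indices, the shared characterisation of both sides
def pvIdxs (header : List String) (cols_lst : List String) : List Nat :=
  cols_lst.foldl (fun idxs name =>
    match PySem.List.index? header name with
    | some j => idxs ++ [j]
    | none => idxs) []

-- A's inner row loop builds exactly the j-th cell of every tail row
theorem pv_colA (d : List (List String)) (j : Nat) :
    (PySem.List.pyRange 1 d.length 1).foldl
      (fun col_lst i =>
        col_lst ++ [PySem.List.pyGetD (PySem.List.pyGetD d i ([] : List String)) (j : Int) ""]) []
    = d.tail.map (fun row => PySem.List.pyGetD row (j : Int) "") := by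
  rw [PySem.List.foldl_append_singleton_eq_map, PySem.List.pyRange_one]
  rw [List.map_map]
  cases d with
  | nil => simp
  | cons hd tl =>
    simp only [List.length_cons, List.tail_cons]
    have hn : (((tl.length + 1 : Nat) : Int) - 1).toNat = tl.length := by push_cast; omega
    rw [hn, List.nil_append]
    apply List.ext_getElem
    · simp
    · intro i h1 h2
      simp only [List.getElem_map, List.getElem_range, Function.comp]
      have : (1 : Int) + (i : Int) = ((i + 1 : Nat) : Int) := by push_cast; ring
      rw [this]
      simp only [List.length_map, List.length_range] at h1
      simp only [PySem.List.pyGetD_natCast, List.getD_cons_succ]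
      rw [List.getD_eq_getElem _ _ h1]

-- the outer name fold, with the appended element abstracted by g
theorem pv_fold_map (g : Nat → List String) (h : List String) :
    ∀ (c : List String) (accI : List Nat),
    c.foldl (fun acc name => match PySem.List.index? h name with
        | none => acc | some j => acc ++ [g j]) (accI.map g)
    = (c.foldl (fun idxs name => match PySem.List.index? h name with
        | some j => idxs ++ [j] | none => idxs) accI).map g := by
  intro c
  induction c with
  | nil => intro accI; rfl
  | cons name rest ih =>
    intro accI
    cases hidx : PySem.List.index? h name with
    | none => simp only [List.foldl_cons, hidx]; exact ih accI
    | some j =>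
      simp only [List.foldl_cons, hidx]
      have : accI.map g ++ [g j] = (accI ++ [j]).map g := by simp
      rw [this]; exact ih (accI ++ [j])

theorem pv_zipWith_zipWith (f g : List String → Nat → List String) :
    ∀ (xs : List (List String)) (ys : List Nat),
    List.zipWith f (List.zipWith g xs ys) ys = List.zipWith (fun x y => f (g x y) y) xs ys := by
  intro xs
  induction xs with
  | nil => intro ys; simp
  | cons x xs ih =>
    intro ys
    cases ys with
    | nil => simp
    | cons y ys => simp [ih]

theorem pv_zipWith_id (cols : List (List String)) (idxs : List Nat) (h : cols.length = idxs.length) :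
    List.zipWith (fun (col : List String) (_ : Nat) => col) cols idxs = cols := by
  induction cols generalizing idxs with
  | nil => simp
  | cons c cs ih =>
    cases idxs with
    | nil => simp at h
    | cons j js => simp only [List.zipWith]; rw [ih js (by simpa using h)]

-- B's outer (row) fold appends every row's cell columnwise
theorem pv_rows_eq (idxs : List Nat) :
    ∀ (rows cols : List (List String)), cols.length = idxs.length →
    rows.foldl (fun cols row =>
      List.zipWith (fun (col : List String) (idx : Nat) =>
        col ++ [PySem.List.pyGetD row (idx : Int) ""]) cols idxs) cols
    = List.zipWith (fun (col : List String) (j : Nat) => col ++ rows.map (fun row => PySem.List.pyGetD row (j : Int) "")) cols idxs := by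
  intro rows
  induction rows with
  | nil =>
    intro cols hl
    simp only [List.foldl_nil, List.map_nil, List.append_nil]
    exact (pv_zipWith_id cols idxs hl).symm
  | cons row rows ih =>
    intro cols hl
    rw [List.foldl_cons]
    have hl2 : (List.zipWith (fun (col : List String) (j : Nat) => col ++ [PySem.List.pyGetD row (j : Int) ""]) cols idxs).length = idxs.length := by
      simp [List.length_zipWith, hl]
    rw [ih _ hl2, pv_zipWith_zipWith]
    simp

theorem pv_zipWith_map_nil (f : List String → Nat → List String) (idxs : List Nat) :
    List.zipWith f (idxs.map (fun _ => ([] : List String))) idxs = idxs.map (fun j => f [] j) := by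
  induction idxs with
  | nil => simp
  | cons j js ih => simp only [List.map_cons, List.zipWith_cons_cons, ih]

theorem pv_A_eq (d : List (List String)) (c : List String) :
    get_columns_no_lc d c
    = (pvIdxs (PySem.List.pyGetD d 0 []) c).map
        (fun (j : Nat) => d.tail.map (fun row => PySem.List.pyGetD row (j : Int) "")) := by
  unfold get_columns_no_lc pvIdxs
  simp only [pv_colA]
  exact pv_fold_map _ _ c []

theorem pv_B_eq (d : List (List String)) (c : List String) :
    get_columns_no_lc_alt d c
    = (pvIdxs (PySem.List.pyGetD d 0 []) c).map
        (fun (j : Nat) => d.tail.map (fun row => PySem.List.pyGetD row (j : Int) "")) := by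
  simp only [get_columns_no_lc_alt]
  rw [PySem.List.slice_from_one]
  have hid : c.foldl (fun idxs name =>
      match PySem.List.index? (PySem.List.pyGetD d 0 []) name with
      | some j => idxs ++ [j]
      | none => idxs) [] = pvIdxs (PySem.List.pyGetD d 0 []) c := rfl
  rw [hid]
  rw [pv_rows_eq _ d.tail _ (by simp)]
  rw [pv_zipWith_map_nil]
  simp

-- ===== VERDICT (by name: the statement is the Claim_ definition above) =====
theorem get_columns_no_lc_spec : Claim_equal_get_columns_no_lc := by
  intro d c _ _
  unfold Spec_get_columns_no_lc
  rw [pv_A_eq, pv_B_eq]
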